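-- pv_equiv track=rewrite | github.com/LixerDev/IdlExplorer | src/models.py | ts_type
-- ===== SOURCE A (Python) =====
-- def ts_type(idl_type: str) -> str:
--     """Map IDL type string to TypeScript type."""
--     mapping = {
--         "publicKey": "PublicKey",
--         "u8": "number",
--         "u16": "number",
--         "u32": "number",
--         "i8": "number",
--         "i16": "number",
--         "i32": "number",
--         "u64": "BN",
--         "u128": "BN",
--         "i64": "BN",
--         "i128": "BN",
--         "f32": "number",
--         "f64": "number",
--         "bool": "boolean",
--         "string": "string",
--         "bytes": "Buffer",
--     }
--     if idl_type.startswith("Option<"):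
--         inner = idl_type[7:-1]
--         return f"{ts_type(inner)} | null"
--     if idl_type.startswith("Vec<"):
--         inner = idl_type[4:-1]
--         return f"{ts_type(inner)}[]"
--     if idl_type.startswith("[") and ";" in idl_type:
--         inner = idl_type[1:idl_type.index(";")].strip()
--         return f"{ts_type(inner)}[]"
--     return mapping.get(idl_type, idl_type)
-- ===== SOURCE B (Python) =====
-- # Table-driven re-implementation: a peel helper driven by a wrapper table strips
-- # one wrapper per step into a pieces stack; the base name is looked up in a map
-- # built from a TS-type -> IDL-names grouping. No recursion.
--
-- _TS_MAP = {}
-- for _ts, _idl_names in (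
--     ("PublicKey", ("publicKey",)),
--     ("number", ("u8", "u16", "u32", "i8", "i16", "i32", "f32", "f64")),
--     ("BN", ("u64", "u128", "i64", "i128")),
--     ("boolean", ("bool",)),
--     ("string", ("string",)),
--     ("Buffer", ("bytes",)),
-- ):
--     for _name in _idl_names:
--         _TS_MAP[_name] = _ts
--
-- _WRAPPERS = (("Option<", " | null"), ("Vec<", "[]"))
--
--
-- def _peel(s):
--     """Strip one outer wrapper: return (inner, ts-suffix piece) or None."""
--     for prefix, piece in _WRAPPERS:
--         if s.startswith(prefix):
--             return s[len(prefix):-1], piece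
--     if s.startswith("[") and ";" in s:
--         return s.partition(";")[0][1:].strip(), "[]"
--     return None
--
--
-- def ts_type(idl_type: str) -> str:
--     """Map IDL type string to TypeScript type."""
--     pieces = []
--     step = _peel(idl_type)
--     while step is not None:
--         idl_type, piece = step
--         pieces.append(piece)
--         step = _peel(idl_type)
--     return _TS_MAP.get(idl_type, idl_type) + "".join(reversed(pieces))
-- ===== Notes on version B (the rewrite author's own statement) =====
-- stated objective: alternative
-- what changed: Replaced A's recursive descent and inline flat dict by an iterative table-driven design: a wrapper table drives a peel helper that strips one wrapper per step onto a pieces stack (joined at the end), the inner of a wrapper is taken with removeprefix/partition-style primitives instead of numeric slicing, and the base-name map is built from a grouped TS-type -> IDL-names table.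
import Mathlib
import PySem

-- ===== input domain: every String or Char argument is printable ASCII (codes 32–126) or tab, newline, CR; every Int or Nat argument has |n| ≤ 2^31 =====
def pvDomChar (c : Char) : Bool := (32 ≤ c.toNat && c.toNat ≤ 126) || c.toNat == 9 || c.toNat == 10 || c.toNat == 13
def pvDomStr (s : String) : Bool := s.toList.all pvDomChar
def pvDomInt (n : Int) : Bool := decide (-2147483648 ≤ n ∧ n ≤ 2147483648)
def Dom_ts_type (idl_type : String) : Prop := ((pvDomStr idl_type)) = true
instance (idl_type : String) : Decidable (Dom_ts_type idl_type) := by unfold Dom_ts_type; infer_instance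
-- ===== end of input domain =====

-- B replaces A's recursive descent and inline dict by an iterative table-driven
-- peel loop with a pieces stack and a grouped mapping table (objective:
-- alternative decomposition, same cost); return values proved equal on all inputs.

-- ===== PORT A =====

-- A's inline mapping dict, literal entry per entry
def tsMapping : PySem.Dict (List Char) (List Char) :=
  PySem.Dict.ofList [
    ("publicKey".toList, "PublicKey".toList),
    ("u8".toList, "number".toList),
    ("u16".toList, "number".toList),
    ("u32".toList, "number".toList),
    ("i8".toList, "number".toList),
    ("i16".toList, "number".toList),
    ("i32".toList, "number".toList),
    ("u64".toList, "BN".toList),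
    ("u128".toList, "BN".toList),
    ("i64".toList, "BN".toList),
    ("i128".toList, "BN".toList),
    ("f32".toList, "number".toList),
    ("f64".toList, "number".toList),
    ("bool".toList, "boolean".toList),
    ("string".toList, "string".toList),
    ("bytes".toList, "Buffer".toList)]

-- the strips A performs are total (Python slicing never raises; index(';') is guarded)
theorem tsPeelOuter_lt (cs : List Char) (a : Int) (h : 1 ≤ cs.length) :
    (PySem.List.slice cs (some a) (some (-1))).length < cs.length := by
  rw [PySem.List.length_slice, PySem.List.clampIdx_neg_one]
  have := PySem.List.clampIdx_le cs.length a
  omega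

-- strip never lengthens (used by the termination arguments)
theorem tsStrip_le (l : List Char) : (PySem.Chars.strip l).length ≤ l.length := by
  simp only [PySem.Chars.strip, PySem.Chars.rstrip, PySem.Chars.lstrip, List.length_reverse]
  exact le_trans (List.length_dropWhile_le _ _)
    (by simpa using List.length_dropWhile_le PySem.Chars.isspace l)

theorem tsStripSlice_le (cs : List Char) (f : Int) :
    (PySem.Chars.strip (PySem.List.slice cs (some 1) (some f))).length ≤
      (PySem.List.slice cs (some 1) (some f)).length := by
  exact tsStrip_le _

theorem tsPeelArray_lt (cs : List Char) (f : Int) (h : 1 ≤ cs.length) :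
    (PySem.Chars.strip (PySem.List.slice cs (some 1) (some f))).length < cs.length := by
  have h1 := tsStripSlice_le cs f
  have h2 := PySem.List.length_slice cs 1 f
  have h3 := PySem.List.clampIdx_le cs.length f
  have h4 : PySem.List.clampIdx cs.length 1 = 1 := by
    simp [PySem.List.clampIdx]; omega
  omega

theorem tsStarts_le (cs p : List Char) (h : PySem.Chars.startswith cs p = true) :
    p.length ≤ cs.length :=
  ((PySem.Chars.startswith_iff cs p).mp h).length_le

-- literal transliteration of A's recursion on the code points
def tsA (cs : List Char) : List Char :=
  if h1 : PySem.Chars.startswith cs "Option<".toList = true then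
    tsA (PySem.List.slice cs (some 7) (some (-1))) ++ " | null".toList
  else if h2 : PySem.Chars.startswith cs "Vec<".toList = true then
    tsA (PySem.List.slice cs (some 4) (some (-1))) ++ "[]".toList
  else if h3 : PySem.Chars.startswith cs "[".toList = true ∧ PySem.Chars.isIn ";".toList cs = true then
    tsA (PySem.Chars.strip (PySem.List.slice cs (some 1) (some (PySem.Chars.find cs ";".toList)))) ++ "[]".toList
  else
    tsMapping.getD cs cs
termination_by cs.length
decreasing_by
  · exact tsPeelOuter_lt cs 7 (le_trans (by decide) (tsStarts_le cs _ h1))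
  · exact tsPeelOuter_lt cs 4 (le_trans (by decide) (tsStarts_le cs _ h2))
  · exact tsPeelArray_lt cs _ (le_trans (by decide) (tsStarts_le cs _ h3.1))

def ts_type (idl_type : String) : String := String.ofList (tsA idl_type.toList)

-- ===== PORT B =====

-- B's grouped table of TS type -> IDL names
def tsGroups : List (List Char × List (List Char)) := [
  ("PublicKey".toList, ["publicKey".toList]),
  ("number".toList, ["u8".toList, "u16".toList, "u32".toList, "i8".toList,
                     "i16".toList, "i32".toList, "f32".toList, "f64".toList]),
  ("BN".toList, ["u64".toList, "u128".toList, "i64".toList, "i128".toList]),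
  ("boolean".toList, ["bool".toList]),
  ("string".toList, ["string".toList]),
  ("Buffer".toList, ["bytes".toList])]

-- _TS_MAP built by B's double loop over the grouped table
def tsMapB : PySem.Dict (List Char) (List Char) :=
  tsGroups.foldl (fun d g => g.2.foldl (fun d name => d.insert name g.1) d) PySem.Dict.empty

def tsWrappers : List (List Char × List Char) :=
  [("Option<".toList, " | null".toList), ("Vec<".toList, "[]".toList)]

-- _peel: the for-return loop over _WRAPPERS is findSome?; s[len(prefix):-1] is
-- removeprefix-then-drop-last (drop, dropLast); s.partition(";")[0] is exactly
-- the chars before the first ';' (takeWhile), total either way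
def tsPeel (s : List Char) : Option (List Char × List Char) :=
  match tsWrappers.findSome?
      (fun w => if PySem.Chars.startswith s w.1 then
                  some ((s.drop w.1.length).dropLast, w.2) else none) with
  | some r => some r
  | none =>
      if PySem.Chars.startswith s "[".toList ∧ PySem.Chars.isIn ";".toList s then
        some (PySem.Chars.strip ((s.takeWhile (fun c => c != ';')).drop 1), "[]".toList)
      else none

-- each peel step strictly shrinks the string (for the while loop's termination)
theorem tsPeel_lt (s inner piece : List Char) (h : tsPeel s = some (inner, piece)) :
    inner.length < s.length := by
  unfold tsPeel at h
  unfold tsWrappers at h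
  simp only [List.findSome?] at h
  by_cases h1 : PySem.Chars.startswith s "Option<".toList = true
  · have hl := tsStarts_le s _ h1
    simp only [h1, if_pos] at h
    simp only [Option.some.injEq, Prod.mk.injEq] at h
    obtain ⟨h', _⟩ := h
    subst h'
    simp only [List.length_dropLast, List.length_drop]
    simp at hl ⊢; omega
  · simp only [h1] at h
    simp only [Bool.not_eq_true] at h1
    simp only [if_neg, Bool.false_eq_true, not_false_iff] at h
    by_cases h2 : PySem.Chars.startswith s "Vec<".toList = true
    · have hl := tsStarts_le s _ h2
      simp only [h2, if_pos, Option.some.injEq, Prod.mk.injEq] at h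
      obtain ⟨h', _⟩ := h
      subst h'
      simp only [List.length_dropLast, List.length_drop]
      simp at hl ⊢; omega
    · simp only [Bool.not_eq_true] at h2
      simp only [h2, Bool.false_eq_true, reduceIte] at h
      split at h
      · rename_i h3
        have hl := tsStarts_le s _ h3.1
        simp only [Option.some.injEq, Prod.mk.injEq] at h
        obtain ⟨h', _⟩ := h
        subst h'
        have hsl := tsStrip_le ((s.takeWhile (fun c => c != ';')).drop 1)
        have htw : (s.takeWhile (fun c => c != ';')).length ≤ s.length :=
          (List.takeWhile_sublist _).length_le
        simp at hl
        simp only [List.length_drop] at hsl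
        omega
      · exact absurd h (by simp)

-- B's while loop: peel wrappers onto the pieces stack, then map and join
def tsDrive (s : List Char) (pieces : List (List Char)) : List Char :=
  match h : tsPeel s with
  | some r => tsDrive r.1 (pieces ++ [r.2])
  | none => tsMapB.getD s s ++ pieces.reverse.flatten
termination_by s.length
decreasing_by exact tsPeel_lt s r.1 r.2 (by rw [h])

def ts_type_alt (idl_type : String) : String :=
  String.ofList (tsDrive idl_type.toList [])

-- ===== PRECONDITION & SPEC =====
def Spec_ts_type (idl_type : String) (out : String) : Prop := out = ts_type_alt idl_type
instance (idl_type : String) (out : String) : Decidable (Spec_ts_type idl_type out) := by unfold Spec_ts_type; infer_instance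

-- ===== CLAIM (what is proved, stated in full; the proofs are below) =====
def Claim_equal_ts_type : Prop := ∀ (idl_type : String), Dom_ts_type idl_type → Spec_ts_type idl_type (ts_type idl_type)

-- ===== LEMMAS AND PROOFS =====

-- A's slice s[n:-1] is B's removeprefix-then-droplast
theorem slice_nat_neg_one (cs : List Char) (n : Nat) :
    PySem.List.slice cs (some (n : Int)) (some (-1)) = (cs.drop n).dropLast := by
  simp only [PySem.List.slice, PySem.List.clampIdx_neg_one, PySem.List.clampIdx_natCast]
  rw [List.dropLast_eq_take, List.length_drop]
  rcases le_or_gt n cs.length with hle | hgt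
  · rw [min_eq_left hle]
    congr 1
    omega
  · rw [min_eq_right (le_of_lt hgt), List.drop_of_length_le (le_of_lt hgt),
      List.drop_length]
    simp

theorem slice_seven (cs : List Char) :
    PySem.List.slice cs (some 7) (some (-1)) = (cs.drop 7).dropLast := by
  simpa using slice_nat_neg_one cs 7

theorem slice_four (cs : List Char) :
    PySem.List.slice cs (some 4) (some (-1)) = (cs.drop 4).dropLast := by
  simpa using slice_nat_neg_one cs 4

-- takeWhile p agrees with take i when p holds strictly before i and fails at i
theorem takeWhile_eq_take_idx {α} (p : α → Bool) :
    ∀ (l : List α) (i : Nat),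
      (∀ j (hl : j < l.length), j < i → p l[j] = true) →
      (∀ (hl : i < l.length), p l[i] = false) →
      l.takeWhile p = l.take i
  | [], i, _, _ => by simp
  | x :: t, 0, _, h2 => by
      have := h2 (by simp)
      simp_all
  | x :: t, (k+1), h1, h2 => by
      have hx : p x = true := h1 0 (by simp) (by omega)
      simp only [List.takeWhile_cons, hx, if_pos trivial, List.take_succ_cons,
        List.cons.injEq, true_and]
      exact takeWhile_eq_take_idx p t k
        (fun j hl hj => by simpa using h1 (j+1) (by simpa using hl) (by omega))
        (fun hl => by simpa using h2 (by simpa using hl))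

-- A's s[1:s.index(';')] is B's partition-based chars-before-';' minus the head
theorem slice_one_find (cs : List Char) (h : PySem.Chars.isIn ";".toList cs = true) :
    PySem.List.slice cs (some 1) (some (PySem.Chars.find cs ";".toList)) =
      (cs.takeWhile (fun c => c != ';')).drop 1 := by
  have hinf := (PySem.Chars.isIn_iff_infix _ _).mp h
  have hpos : 0 ≤ PySem.Chars.find cs ";".toList :=
    (PySem.Chars.find_nonneg_iff _ _).mpr hinf
  have hspec := PySem.Chars.find_spec (s := cs) (sub := ";".toList) hpos
  have hle : (PySem.Chars.find cs ";".toList).toNat ≤ cs.length := by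
    have := PySem.Chars.find_le_length cs ";".toList
    omega
  set i := (PySem.Chars.find cs ";".toList).toNat with hi
  have htw : cs.takeWhile (fun c => c != ';') = cs.take i := by
    apply takeWhile_eq_take_idx
    · intro j hl hj
      have hnp := hspec.2 j hj
      simp only [bne_iff_ne, ne_eq]
      intro hcj
      exact hnp ⟨cs.drop (j+1), by
        rw [show (";".toList : List Char) = [';'] from rfl]
        conv_rhs => rw [← List.getElem_cons_drop (as := cs) (h := hl)]
        simp [hcj]⟩
    · intro hl
      have : cs[i] = ';' := by
        obtain ⟨t, ht⟩ := hspec.1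
        have h0 : (cs.drop i).head? = some ';' := by rw [← ht]; rfl
        rw [List.head?_drop, List.getElem?_eq_getElem hl] at h0
        exact Option.some_injective _ h0
      simp [this]
  rw [htw, List.drop_take, PySem.List.slice_toNat] <;> norm_num
  · rw [hi]
  · exact hpos

-- the two mapping tables agree on every lookup (same key-value pairs, distinct keys)
theorem tsMap_agree (cs : List Char) : tsMapping.getD cs cs = tsMapB.getD cs cs := by
  have hA : tsMapping = PySem.Dict.mk [
    ("publicKey".toList, "PublicKey".toList), ("u8".toList, "number".toList),
    ("u16".toList, "number".toList), ("u32".toList, "number".toList),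
    ("i8".toList, "number".toList), ("i16".toList, "number".toList),
    ("i32".toList, "number".toList), ("u64".toList, "BN".toList),
    ("u128".toList, "BN".toList), ("i64".toList, "BN".toList),
    ("i128".toList, "BN".toList), ("f32".toList, "number".toList),
    ("f64".toList, "number".toList), ("bool".toList, "boolean".toList),
    ("string".toList, "string".toList), ("bytes".toList, "Buffer".toList)] := by decide
  have hB : tsMapB = PySem.Dict.mk [
    ("publicKey".toList, "PublicKey".toList), ("u8".toList, "number".toList),
    ("u16".toList, "number".toList), ("u32".toList, "number".toList),
    ("i8".toList, "number".toList), ("i16".toList, "number".toList),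
    ("i32".toList, "number".toList), ("f32".toList, "number".toList),
    ("f64".toList, "number".toList), ("u64".toList, "BN".toList),
    ("u128".toList, "BN".toList), ("i64".toList, "BN".toList),
    ("i128".toList, "BN".toList), ("bool".toList, "boolean".toList),
    ("string".toList, "string".toList), ("bytes".toList, "Buffer".toList)] := by decide
  rw [hA, hB]
  by_cases h0 : cs = "publicKey".toList
  · subst h0; decide
  by_cases h1 : cs = "u8".toList
  · subst h1; decide
  by_cases h2 : cs = "u16".toList
  · subst h2; decide
  by_cases h3 : cs = "u32".toList
  · subst h3; decide
  by_cases h4 : cs = "i8".toList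
  · subst h4; decide
  by_cases h5 : cs = "i16".toList
  · subst h5; decide
  by_cases h6 : cs = "i32".toList
  · subst h6; decide
  by_cases h7 : cs = "u64".toList
  · subst h7; decide
  by_cases h8 : cs = "u128".toList
  · subst h8; decide
  by_cases h9 : cs = "i64".toList
  · subst h9; decide
  by_cases h10 : cs = "i128".toList
  · subst h10; decide
  by_cases h11 : cs = "f32".toList
  · subst h11; decide
  by_cases h12 : cs = "f64".toList
  · subst h12; decide
  by_cases h13 : cs = "bool".toList
  · subst h13; decide
  by_cases h14 : cs = "string".toList
  · subst h14; decide
  by_cases h15 : cs = "bytes".toList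
  · subst h15; decide
  rw [PySem.Dict.getD_of_not_contains, PySem.Dict.getD_of_not_contains]
  · rw [PySem.Dict.contains_mk]
    simp
    exact ⟨fun h => h0 h.symm, fun h => h1 h.symm, fun h => h2 h.symm, fun h => h3 h.symm, fun h => h4 h.symm, fun h => h5 h.symm, fun h => h6 h.symm, fun h => h11 h.symm, fun h => h12 h.symm, fun h => h7 h.symm, fun h => h8 h.symm, fun h => h9 h.symm, fun h => h10 h.symm, fun h => h13 h.symm, fun h => h14 h.symm, fun h => h15 h.symm⟩
  · rw [PySem.Dict.contains_mk]
    simp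
    exact ⟨fun h => h0 h.symm, fun h => h1 h.symm, fun h => h2 h.symm, fun h => h3 h.symm, fun h => h4 h.symm, fun h => h5 h.symm, fun h => h6 h.symm, fun h => h7 h.symm, fun h => h8 h.symm, fun h => h9 h.symm, fun h => h10 h.symm, fun h => h11 h.symm, fun h => h12 h.symm, fun h => h13 h.symm, fun h => h14 h.symm, fun h => h15 h.symm⟩

-- tsPeel written as the three-way branch A's code makes
theorem tsPeel_eq (s : List Char) :
    tsPeel s =
      if PySem.Chars.startswith s "Option<".toList = true then
        some ((s.drop 7).dropLast, " | null".toList)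
      else if PySem.Chars.startswith s "Vec<".toList = true then
        some ((s.drop 4).dropLast, "[]".toList)
      else if PySem.Chars.startswith s "[".toList = true ∧ PySem.Chars.isIn ";".toList s = true then
        some (PySem.Chars.strip ((s.takeWhile (fun c => c != ';')).drop 1), "[]".toList)
      else none := by
  unfold tsPeel tsWrappers
  simp only [List.findSome?]
  by_cases h1 : PySem.Chars.startswith s "Option<".toList = true
  · have h1' : PySem.Chars.startswith s ['O','p','t','i','o','n','<'] = true := h1
    simp [h1']
  · have h1' : PySem.Chars.startswith s ['O','p','t','i','o','n','<'] = false :=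
      Bool.not_eq_true _ |>.mp h1
    by_cases h2 : PySem.Chars.startswith s "Vec<".toList = true
    · have h2' : PySem.Chars.startswith s ['V','e','c','<'] = true := h2
      simp [h1', h2']
    · have h2' : PySem.Chars.startswith s ['V','e','c','<'] = false :=
        Bool.not_eq_true _ |>.mp h2
      simp [h1', h2']

-- one successful peel step is one unfolding of A's recursion
theorem tsA_peel (s : List Char) (r : List Char × List Char) (h : tsPeel s = some r) :
    tsA s = tsA r.1 ++ r.2 := by
  rw [tsPeel_eq] at h
  by_cases h1 : PySem.Chars.startswith s "Option<".toList = true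
  · rw [if_pos h1, Option.some_inj] at h
    rw [tsA, dif_pos h1, slice_seven, ← h]
  · rw [if_neg h1] at h
    by_cases h2 : PySem.Chars.startswith s "Vec<".toList = true
    · rw [if_pos h2, Option.some_inj] at h
      rw [tsA, dif_neg h1, dif_pos h2, slice_four, ← h]
    · rw [if_neg h2] at h
      by_cases h3 : PySem.Chars.startswith s "[".toList = true ∧ PySem.Chars.isIn ";".toList s = true
      · rw [if_pos h3, Option.some_inj] at h
        rw [tsA, dif_neg h1, dif_neg h2, dif_pos h3, slice_one_find s h3.2, ← h]
      · rw [if_neg h3] at h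
        exact absurd h (by simp)

-- a failed peel is A's base case
theorem tsA_of_peel_none (s : List Char) (h : tsPeel s = none) :
    tsA s = tsMapping.getD s s := by
  rw [tsPeel_eq] at h
  split_ifs at h with h1 h2 h3
  rw [tsA, dif_neg h1, dif_neg h2, dif_neg h3]

-- loop invariant: B's drive loop computes A's recursive value followed by the joined stack
theorem tsDrive_eq (s : List Char) (pieces : List (List Char)) :
    tsDrive s pieces = tsA s ++ pieces.reverse.flatten := by
  fun_induction tsDrive s pieces with
  | case1 s pieces r h ih =>
      rw [ih, tsA_peel s r h]
      simp [List.append_assoc]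
  | case2 s pieces h =>
      rw [tsA_of_peel_none s h, tsMap_agree]

-- ===== VERDICT (by name: the statement is the Claim_ definition above) =====
theorem ts_type_spec : Claim_equal_ts_type := by
  intro s _
  unfold Spec_ts_type ts_type ts_type_alt
  rw [tsDrive_eq, List.reverse_nil, List.flatten_nil, List.append_nil]
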